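-- pv_equiv track=rewrite | github.com/superkaiba/icl-structural-influence | experiments/core/run_seahorse_collapse_experiment.py | detect_loop_onset
-- ===== SOURCE A (Python) =====
-- def detect_loop_onset(tokens, min_repeats=3):
--     """Find the token index where repetition begins."""
--     text = "".join(tokens)
--     for pattern_len in range(1, min(30, len(text) // min_repeats)):
--         for start in range(len(text) - pattern_len * min_repeats):
--             pattern = text[start:start + pattern_len]
--             if len(pattern.strip()) == 0:
--                 continue
--             count = 0
--             pos = start
--             while pos + pattern_len <= len(text) and text[pos:pos + pattern_len] == pattern:
--                 count += 1
--                 pos += pattern_len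
--             if count >= min_repeats:
--                 char_count = 0
--                 for token_idx, tok in enumerate(tokens):
--                     char_count += len(tok)
--                     if char_count >= start:
--                         return token_idx
--     return None
-- ===== SOURCE B (Python) =====
-- def detect_loop_onset(tokens, min_repeats=3):
--     """Find the token index where repetition begins."""
--     text = "".join(tokens)
--     n = len(text)
--     cum = []
--     s = 0
--     for tok in tokens:
--         s += len(tok)
--         cum.append(s)
--     for L in range(1, min(30, n // min_repeats)):
--         need = (min_repeats - 1) * L
--         limit = n - L * min_repeats
--         best = -1
--         r = 0
--         last_ns = n
--         for i in range(n - 1, -1, -1):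
--             r = r + 1 if i + L < n and text[i] == text[i + L] else 0
--             if not text[i].isspace():
--                 last_ns = i
--             if i < limit and last_ns < i + L and r >= need:
--                 best = i
--         if best >= 0:
--             for idx, c in enumerate(cum):
--                 if c >= best:
--                     return idx
--     return None
-- ===== Notes on version B (the rewrite author's own statement) =====
-- stated objective: faster
-- what changed: Replaces A's per-start pattern slicing and block-by-block recount by, per pattern length L, a single backward sweep maintaining the run length of text[i]==text[i+L] matches and the next non-space index, plus a precomputed cumulative token-length table for the final index lookup.
import Mathlib
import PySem

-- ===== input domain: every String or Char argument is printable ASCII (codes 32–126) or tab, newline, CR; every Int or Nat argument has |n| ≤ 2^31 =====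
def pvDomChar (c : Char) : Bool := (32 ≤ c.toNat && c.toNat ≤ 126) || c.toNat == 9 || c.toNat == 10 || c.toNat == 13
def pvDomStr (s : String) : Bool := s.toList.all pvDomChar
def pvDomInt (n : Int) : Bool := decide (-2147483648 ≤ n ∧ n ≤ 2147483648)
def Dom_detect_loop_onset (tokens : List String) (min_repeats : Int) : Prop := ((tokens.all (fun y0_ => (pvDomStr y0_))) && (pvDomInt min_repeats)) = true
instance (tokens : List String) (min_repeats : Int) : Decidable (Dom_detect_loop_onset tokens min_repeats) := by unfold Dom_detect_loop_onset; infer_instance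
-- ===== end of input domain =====

-- B replaces A's per-start repeated pattern slicing and counting (O(30·n²) worst case) by one
-- backward O(n) sweep per pattern length maintaining the run length of text[i]==text[i+L]
-- matches and the next non-space position, plus a precomputed cumulative-length table.

-- ===== PORT A =====
-- the while loop: while pos + L <= len(text) and text[pos:pos+L] == pattern: count += 1; pos += L
def pvA_while (text pattern : List Char) (L : Int) : Nat → Int → Int → Int
  | 0, _, count => count
  | fuel + 1, pos, count =>
    if pos + L ≤ (text.length : Int) ∧ PySem.List.slice text (some pos) (some (pos + L)) = pattern
    then pvA_while text pattern L fuel (pos + L) (count + 1)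
    else count

-- for token_idx, tok in enumerate(tokens): char_count += len(tok); if char_count >= start: return token_idx
def pvA_tok : List String → Int → Int → Int → Option Int
  | [], _, _, _ => none
  | t :: ts, start, idx, cc =>
    if cc + PySem.Str.len t ≥ start then some idx
    else pvA_tok ts start (idx + 1) (cc + PySem.Str.len t)

-- for start in range(...): pattern = ...; if strip empty: continue; count; if count >= min_repeats: token scan
def pvA_startLoop (text : List Char) (tokens : List String) (mr L : Int) : List Int → Option Int
  | [] => none
  | start :: rest =>
    let pattern := PySem.List.slice text (some start) (some (start + L))
    if (PySem.Chars.strip pattern).length = 0 then pvA_startLoop text tokens mr L rest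
    else if pvA_while text pattern L (text.length + 1) start 0 ≥ mr then
      match pvA_tok tokens start 0 0 with
      | some i => some i
      | none => pvA_startLoop text tokens mr L rest
    else pvA_startLoop text tokens mr L rest

-- for pattern_len in range(1, min(30, len(text) // min_repeats)):
def pvA_lenLoop (text : List Char) (tokens : List String) (mr : Int) : List Int → Option Int
  | [] => none
  | L :: rest =>
    match pvA_startLoop text tokens mr L (PySem.List.pyRange 0 ((text.length : Int) - L * mr) 1) with
    | some i => some i
    | none => pvA_lenLoop text tokens mr rest

def detect_loop_onset (tokens : List String) (min_repeats : Int) : Option Int :=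
  let text := PySem.Chars.join [] (tokens.map String.toList)
  pvA_lenLoop text tokens min_repeats
    (PySem.List.pyRange 1 (min 30 (PySem.Int.floordiv (text.length : Int) min_repeats)) 1)

-- ===== PORT B =====
-- cumulative token lengths: for tok in tokens: s += len(tok); cum.append(s)
def pvB_cum : List String → Int → List Int
  | [], _ => []
  | t :: ts, s => (s + PySem.Str.len t) :: pvB_cum ts (s + PySem.Str.len t)

-- for idx, c in enumerate(cum): if c >= best: return idx
def pvB_find : List Int → Int → Int → Option Int
  | [], _, _ => none
  | c :: cs, best, idx => if c ≥ best then some idx else pvB_find cs best (idx + 1)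

-- for i in range(n-1, -1, -1): update r, last_ns, best  (counter i+1 processes index i)
def pvB_scan (text : List Char) (L : Nat) (need limit : Int) : Nat → Int → Int → Int → Int
  | 0, _, _, best => best
  | i + 1, r, lastNS, best =>
    let r2 := if i + L < text.length ∧ text.getD i ' ' = text.getD (i + L) ' ' then r + 1 else 0
    let lastNS2 := if PySem.Chars.isspace (text.getD i ' ') = false then (i : Int) else lastNS
    let best2 := if (i : Int) < limit ∧ lastNS2 < (i : Int) + L ∧ r2 ≥ need then (i : Int) else best
    pvB_scan text L need limit i r2 lastNS2 best2

-- for L in range(1, min(30, n // min_repeats)): backward sweep, then token lookup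
def pvB_lenLoop (text : List Char) (cum : List Int) (mr : Int) : List Int → Option Int
  | [] => none
  | L :: rest =>
    let best := pvB_scan text L.toNat ((mr - 1) * L) ((text.length : Int) - L * mr)
                  text.length 0 (text.length : Int) (-1)
    if best ≥ 0 then
      match pvB_find cum best 0 with
      | some i => some i
      | none => pvB_lenLoop text cum mr rest
    else pvB_lenLoop text cum mr rest

def detect_loop_onset_alt (tokens : List String) (min_repeats : Int) : Option Int :=
  let text := PySem.Chars.join [] (tokens.map String.toList)
  pvB_lenLoop text (pvB_cum tokens 0) min_repeats
    (PySem.List.pyRange 1 (min 30 (PySem.Int.floordiv (text.length : Int) min_repeats)) 1)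

-- ===== PRECONDITION & SPEC =====
-- Pre_ excludes only min_repeats = 0, where A raises ZeroDivisionError (len(text) // 0).
def Pre_detect_loop_onset (tokens : List String) (min_repeats : Int) : Prop := min_repeats ≠ 0
instance (tokens : List String) (min_repeats : Int) : Decidable (Pre_detect_loop_onset tokens min_repeats) := by unfold Pre_detect_loop_onset; infer_instance
def pvWitness_detect_loop_onset : List String × Int := (["ab", "ab", "ab x"], 3)

def Spec_detect_loop_onset (tokens : List String) (min_repeats : Int) (out : Option Int) : Prop := out = detect_loop_onset_alt tokens min_repeats
instance (tokens : List String) (min_repeats : Int) (out : Option Int) : Decidable (Spec_detect_loop_onset tokens min_repeats out) := by unfold Spec_detect_loop_onset; infer_instance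

-- ===== CLAIM (what is proved, stated in full; the proofs are below) =====
def Claim_equal_detect_loop_onset : Prop := ∀ (tokens : List String) (min_repeats : Int), Dom_detect_loop_onset tokens min_repeats → Pre_detect_loop_onset tokens min_repeats → Spec_detect_loop_onset tokens min_repeats (detect_loop_onset tokens min_repeats)

-- ===== LEMMAS AND PROOFS =====

-- proof-side specification helpers -------------------------------------------------

-- run length of text[i]==text[i+L] matches starting at i (value of Source B's r at index i)
def pvRun (text : List Char) (L : Nat) (i : Nat) : Int :=
  if h : i + L < text.length ∧ text.getD i ' ' = text.getD (i + L) ' '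
  then pvRun text L (i + 1) + 1 else 0
termination_by text.length - i
decreasing_by omega

-- first non-space index ≥ i (value of Source B's last_ns at index i), text.length if none
def pvLns (text : List Char) (i : Nat) : Int :=
  if h : i < text.length then
    (if PySem.Chars.isspace (text.getD i ' ') then pvLns text (i + 1) else (i : Int))
  else (text.length : Int)
termination_by text.length - i
decreasing_by omega

-- B's qualifying predicate at index i
def pvQ (text : List Char) (L : Nat) (need limit : Int) (i : Nat) : Bool :=
  decide ((i : Int) < limit ∧ pvLns text i < (i : Int) + L ∧ need ≤ pvRun text L i)

-- A's qualifying predicate at start s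
def pvQA (text : List Char) (mr L : Int) (s : Int) : Bool :=
  decide (¬ (PySem.Chars.strip (PySem.List.slice text (some s) (some (s + L)))).length = 0 ∧
          mr ≤ pvA_while text (PySem.List.slice text (some s) (some (s + L))) L (text.length + 1) s 0)

-- basic helpers --------------------------------------------------------------------

theorem pv_join_nil_flatten (ps : List (List Char)) :
    PySem.Chars.join [] ps = ps.flatten := by
  induction ps with
  | nil => rfl
  | cons a l ih =>
    cases l with
    | nil => simp [PySem.Chars.join, List.intercalate]
    | cons b r => rw [PySem.Chars.join_cons_cons, ih]; simp

theorem pv_sum_len (tokens : List String) :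
    (((tokens.map String.toList).flatten.length : Int)) = (tokens.map PySem.Str.len).sum := by
  induction tokens with
  | nil => simp
  | cons t ts ih =>
    simp only [List.map_cons, List.flatten_cons, List.length_append, List.sum_cons, PySem.Str.len]
    push_cast at ih ⊢
    omega

theorem pv_tok_eq_find (ts : List String) (start idx cc : Int) :
    pvA_tok ts start idx cc = pvB_find (pvB_cum ts cc) start idx := by
  induction ts generalizing idx cc with
  | nil => simp [pvA_tok, pvB_cum, pvB_find]
  | cons t ts ih => simp only [pvA_tok, pvB_cum, pvB_find]; split_ifs with h <;> simp [ih]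

theorem pv_tok_total (ts : List String) (start idx cc : Int)
    (h1 : cc ≤ start) (h2 : start < cc + (ts.map PySem.Str.len).sum) :
    (pvA_tok ts start idx cc).isSome := by
  induction ts generalizing idx cc with
  | nil => simp at h2; omega
  | cons t ts ih =>
    simp only [pvA_tok]
    split_ifs with h
    · simp
    · exact ih (idx + 1) (cc + PySem.Str.len t) (by omega) (by simp at h2 ⊢; omega)

theorem pv_strip_len_zero_iff (cs : List Char) :
    (PySem.Chars.strip cs).length = 0 ↔ ∀ c ∈ cs, PySem.Chars.isspace c = true := by
  simp only [PySem.Chars.strip, PySem.Chars.rstrip, PySem.Chars.lstrip, List.length_eq_zero_iff,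
    List.reverse_eq_nil_iff, List.dropWhile_eq_nil_iff, List.mem_reverse]
  constructor
  · intro h c hc
    have hc2 : c ∈ List.takeWhile PySem.Chars.isspace cs ++ List.dropWhile PySem.Chars.isspace cs := by
      rw [List.takeWhile_append_dropWhile]; exact hc
    rcases List.mem_append.1 hc2 with h1 | h1
    · exact List.mem_takeWhile_imp h1
    · exact h c h1
  · intro h c hc
    exact h c ((List.dropWhile_sublist PySem.Chars.isspace).mem hc)

-- characterizations of the proof-side helpers --------------------------------------

theorem pv_run_nonneg (text : List Char) (L i : Nat) : 0 ≤ pvRun text L i := by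
  induction hn : text.length - i generalizing i with
  | zero => rw [pvRun]; rw [dif_neg (by omega)]
  | succ f ih =>
    rw [pvRun]
    split_ifs with h
    · have := ih (i + 1) (by omega); omega
    · omega

theorem pv_run_ge_iff (text : List Char) (L : Nat) (k : Nat) : ∀ (j : Nat),
    ((k : Int) ≤ pvRun text L j ↔
      ∀ p < k, j + p + L < text.length ∧ text.getD (j + p) ' ' = text.getD (j + p + L) ' ') := by
  induction k with
  | zero => intro j; simpa using pv_run_nonneg text L j
  | succ k ih =>
    intro j
    rw [pvRun]
    split_ifs with h
    · constructor
      · intro hk p hp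
        match p, hp with
        | 0, _ => simpa using h
        | p' + 1, hp =>
          have h2 := (ih (j + 1)).1 (by omega) p' (by omega)
          have e : j + 1 + p' = j + (p' + 1) := by omega
          rw [e] at h2
          exact ⟨by omega, h2.2⟩
      · intro hall
        have h2 : (k : Int) ≤ pvRun text L (j + 1) := by
          apply (ih (j + 1)).2
          intro p hp
          have h3 := hall (p + 1) (by omega)
          have e : j + (p + 1) = j + 1 + p := by omega
          rw [e] at h3
          exact ⟨by omega, h3.2⟩
        push_cast
        omega
    · constructor
      · intro hk; exfalso; push_cast at hk; omega
      · intro hall; exact absurd (by simpa using hall 0 (by omega)) h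

theorem pv_lns_lt_iff (text : List Char) (j m : Nat) (hm : m ≤ text.length) :
    pvLns text j < (m : Int) ↔
      ∃ t, j ≤ t ∧ t < m ∧ PySem.Chars.isspace (text.getD t ' ') = false := by
  induction hn : text.length - j generalizing j with
  | zero =>
    rw [pvLns, dif_neg (by omega)]
    constructor
    · intro h; exfalso; omega
    · intro ⟨t, ht1, ht2, _⟩; exfalso; omega
  | succ f ih =>
    have hj : j < text.length := by omega
    rw [pvLns, dif_pos hj]
    split_ifs with hs
    · rw [ih (j + 1) (by omega)]
      constructor
      · intro ⟨t, ht1, ht2, ht3⟩; exact ⟨t, by omega, ht2, ht3⟩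
      · intro ⟨t, ht1, ht2, ht3⟩
        refine ⟨t, ?_, ht2, ht3⟩
        rcases Nat.lt_or_ge j t with h1 | h1
        · omega
        · exfalso; have : t = j := by omega
          rw [this] at ht3; rw [hs] at ht3; exact absurd ht3 (by simp)
    · constructor
      · intro h
        exact ⟨j, le_refl j, by exact_mod_cast h, by simpa using hs⟩
      · intro ⟨t, ht1, ht2, _⟩
        have : j < m := by omega
        exact_mod_cast Int.ofNat_lt.mpr this

theorem pv_run_len (text : List Char) (L : Nat) : pvRun text L text.length = 0 := by
  rw [pvRun]; simp

theorem pv_lns_len (text : List Char) : pvLns text text.length = (text.length : Int) := by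
  rw [pvLns]; simp

-- A's while loop -------------------------------------------------------------------

theorem pv_while_ge_count (text pat : List Char) (L : Int) :
    ∀ (fuel : Nat) (pos count : Int), count ≤ pvA_while text pat L fuel pos count := by
  intro fuel
  induction fuel with
  | zero => intro pos count; simp [pvA_while]
  | succ f ih =>
    intro pos count
    simp only [pvA_while]
    split_ifs with h
    · have := ih (pos + L) (count + 1); omega
    · omega

theorem pv_while_ge_iff (text pat : List Char) (L : Int) :
    ∀ (k fuel : Nat) (pos count : Int), k ≤ fuel →
      (count + (k : Int) ≤ pvA_while text pat L fuel pos count ↔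
        ∀ jj : Int, 0 ≤ jj → jj < (k : Int) → pos + jj * L + L ≤ (text.length : Int) ∧
          PySem.List.slice text (some (pos + jj * L)) (some (pos + jj * L + L)) = pat) := by
  intro k
  induction k with
  | zero =>
    intro fuel pos count _
    constructor
    · intro _ jj h0 hk; exfalso; omega
    · intro _; simpa using pv_while_ge_count text pat L fuel pos count
  | succ k ih =>
    intro fuel pos count hkf
    match fuel, hkf with
    | f + 1, hkf =>
      rw [pvA_while]
      split_ifs with hc
      · have ihspec := ih f (pos + L) (count + 1) (by omega)
        constructor
        · intro hk jj h0 hjk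
          rcases eq_or_lt_of_le h0 with rfl | h0'
          · exact ⟨by simpa using hc.1, by simpa using hc.2⟩
          · have h2 := ihspec.1 (by
              have hw := pv_while_ge_count text pat L f (pos + L) (count + 1)
              push_cast at hk
              linarith) (jj - 1) (by omega) (by push_cast; omega)
            have e : pos + L + (jj - 1) * L = pos + jj * L := by ring
            rw [e] at h2
            exact h2
        · intro hall
          have h2 : count + 1 + (k : Int) ≤ pvA_while text pat L f (pos + L) (count + 1) := by
            apply ihspec.2
            intro jj h0 hjk
            have h3 := hall (jj + 1) (by omega) (by push_cast; omega)
            have e : pos + (jj + 1) * L = pos + L + jj * L := by ring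
            rw [e] at h3
            exact h3
          push_cast
          linarith
      · constructor
        · intro hk; exfalso
          have : (1 : Int) ≤ ((k + 1 : Nat) : Int) := by push_cast; omega
          linarith
        · intro hall; exfalso
          apply hc
          have := hall 0 le_rfl (by push_cast; omega)
          simpa using this

-- slices vs characters -------------------------------------------------------------

theorem pv_slice_eq_iff (text : List Char) (a b Ln : Nat)
    (ha : a + Ln ≤ text.length) (hb : b + Ln ≤ text.length) :
    ((text.drop a).take Ln = (text.drop b).take Ln ↔
      ∀ t < Ln, text.getD (a + t) ' ' = text.getD (b + t) ' ') := by
  have hlen1 : ((text.drop a).take Ln).length = Ln := by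
    simp [List.length_take, List.length_drop]; omega
  have hlen2 : ((text.drop b).take Ln).length = Ln := by
    simp [List.length_take, List.length_drop]; omega
  constructor
  · intro heq t ht
    have h1 : a + t < text.length := by omega
    have h2 : b + t < text.length := by omega
    rw [List.getD_eq_getElem text ' ' h1, List.getD_eq_getElem text ' ' h2]
    have e1 : ((text.drop a).take Ln)[t]'(by omega) = text[a + t]'h1 := by
      simp [List.getElem_take, List.getElem_drop]
    have e2 : ((text.drop b).take Ln)[t]'(by omega) = text[b + t]'h2 := by
      simp [List.getElem_take, List.getElem_drop]
    rw [← e1, ← e2]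
    exact List.getElem_of_eq heq _
  · intro hch
    apply List.ext_getElem (by rw [hlen1, hlen2])
    intro i h1 h2
    simp only [List.getElem_take, List.getElem_drop]
    have h3 := hch i (by omega)
    rwa [List.getD_eq_getElem text ' ' (by omega), List.getD_eq_getElem text ' ' (by omega)] at h3

theorem pv_blocks_iff_chars (text : List Char) (s Ln k : Nat)
    (hL : 1 ≤ Ln) (hk : 1 ≤ k) (hn : s + k * Ln ≤ text.length) :
    ((∀ j < k, ∀ t < Ln, text.getD (s + j * Ln + t) ' ' = text.getD (s + t) ' ') ↔
      (∀ p < (k - 1) * Ln, text.getD (s + p) ' ' = text.getD (s + p + Ln) ' ')) := by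
  constructor
  · intro hb p hp
    have hL0 : 0 < Ln := hL
    have hpe : p / Ln * Ln + p % Ln = p := by
      rw [Nat.mul_comm]; exact Nat.div_add_mod p Ln
    have htL : p % Ln < Ln := Nat.mod_lt _ hL0
    have hjk : p / Ln < k - 1 := (Nat.div_lt_iff_lt_mul hL0).2 hp
    have hmul : (p / Ln + 1) * Ln = p / Ln * Ln + Ln := by ring
    have b1 := hb (p / Ln) (by omega) (p % Ln) htL
    have b2 := hb (p / Ln + 1) (by omega) (p % Ln) htL
    rw [hmul] at b2
    calc text.getD (s + p) ' ' = text.getD (s + p / Ln * Ln + p % Ln) ' ' := by congr 1; omega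
      _ = text.getD (s + p % Ln) ' ' := b1
      _ = text.getD (s + (p / Ln * Ln + Ln) + p % Ln) ' ' := b2.symm
      _ = text.getD (s + p + Ln) ' ' := by congr 1; omega
  · intro hch j
    induction j with
    | zero => intro _ t ht; congr 1; omega
    | succ j ihj =>
      intro hjk t ht
      have hmul : (j + 1) * Ln = j * Ln + Ln := by ring
      have hub : (j + 1) * Ln ≤ (k - 1) * Ln := Nat.mul_le_mul_right _ (by omega)
      have hp : j * Ln + t < (k - 1) * Ln := by omega
      have hc := hch (j * Ln + t) hp
      have ihv := ihj (by omega) t ht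
      calc text.getD (s + (j + 1) * Ln + t) ' ' = text.getD (s + (j * Ln + t) + Ln) ' ' := by congr 1; omega
        _ = text.getD (s + (j * Ln + t)) ' ' := hc.symm
        _ = text.getD (s + j * Ln + t) ' ' := by congr 1; omega
        _ = text.getD (s + t) ' ' := ihv

-- pointwise equality of the two qualifying predicates ------------------------------

theorem pv_point (text : List Char) (mr L : Int) (hL : 1 ≤ L) (hmr : 1 ≤ mr) (j : Nat)
    (hj : (j : Int) < (text.length : Int) - L * mr) :
    pvQA text mr L (j : Int) = pvQ text L.toNat ((mr - 1) * L) ((text.length : Int) - L * mr) j := by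
  have hLn : ((L.toNat : Nat) : Int) = L := Int.toNat_of_nonneg (by omega)
  have hk : ((mr.toNat : Nat) : Int) = mr := Int.toNat_of_nonneg (by omega)
  set n := text.length with hn
  set Ln := L.toNat with hLndef
  set k := mr.toNat with hkdef
  have hLn1 : 1 ≤ Ln := by omega
  have hk1 : 1 ≤ k := by omega
  have hLM : L * mr = ((Ln * k : Nat) : Int) := by rw [Nat.cast_mul, hLn, hk]
  have hjn : j + Ln * k < n := by rw [hLM] at hj; omega
  have hjL : j + Ln ≤ n := by
    have h5 := Nat.mul_le_mul_left Ln hk1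
    omega
  have hpat : PySem.List.slice text (some (j : Int)) (some ((j : Int) + L)) =
      (text.drop j).take Ln := by
    rw [← hLn]
    exact PySem.List.slice_natCast_add text j Ln
  have hlenpat : ((text.drop j).take Ln).length = Ln := by
    simp [List.length_take, List.length_drop]; omega
  -- strip condition ↔ all characters of the window are whitespace
  have hstrip : ((PySem.Chars.strip (PySem.List.slice text (some (j : Int)) (some ((j : Int) + L)))).length = 0)
      ↔ ∀ t < Ln, PySem.Chars.isspace (text.getD (j + t) ' ') = true := by
    rw [hpat, pv_strip_len_zero_iff]
    constructor
    · intro h t ht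
      have he : ((text.drop j).take Ln)[t]'(by omega) = text[j + t]'(by omega) := by
        simp [List.getElem_take, List.getElem_drop]
      rw [List.getD_eq_getElem text ' ' (by omega), ← he]
      exact h _ (List.getElem_mem _)
    · intro h c hc
      obtain ⟨t, ht, rfl⟩ := List.mem_iff_getElem.1 hc
      have h2 := h t (by omega)
      rw [List.getD_eq_getElem text ' ' (by omega)] at h2
      simpa [List.getElem_take, List.getElem_drop] using h2
  -- last-non-space condition ↔ some character of the window is not whitespace
  have hlns : (pvLns text j < (j : Int) + L) ↔
      ∃ t < Ln, PySem.Chars.isspace (text.getD (j + t) ' ') = false := by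
    have hcast : (j : Int) + L = ((j + Ln : Nat) : Int) := by rw [← hLn]; push_cast; ring
    rw [hcast, pv_lns_lt_iff text j (j + Ln) hjL]
    constructor
    · rintro ⟨t, ht1, ht2, ht3⟩
      exact ⟨t - j, by omega, by rw [show j + (t - j) = t from by omega]; exact ht3⟩
    · rintro ⟨t, ht, ht3⟩
      exact ⟨j + t, by omega, by omega, ht3⟩
  -- the while-loop condition ↔ the shifted-character condition
  have hkLn : (k - 1) * Ln + Ln = k * Ln := by
    have e : (k - 1 + 1) * Ln = (k - 1) * Ln + Ln := by ring
    rw [show k - 1 + 1 = k from by omega] at e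
    omega
  have hchars_bound : ∀ p < (k - 1) * Ln, j + p + Ln < n := by
    intro p hp
    have hLk : Ln * k = k * Ln := Nat.mul_comm _ _
    omega
  have hwhile : (mr ≤ pvA_while text ((text.drop j).take Ln) L (n + 1) (j : Int) 0) ↔
      ∀ p < (k - 1) * Ln, text.getD (j + p) ' ' = text.getD (j + p + Ln) ' ' := by
    have hkfuel : k ≤ n + 1 := by
      have : k ≤ Ln * k := Nat.le_mul_of_pos_left k (by omega)
      omega
    have hw := pv_while_ge_iff text ((text.drop j).take Ln) L k (n + 1) (j : Int) 0 hkfuel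
    rw [hk, zero_add] at hw
    rw [hw]
    constructor
    · intro hall
      apply (pv_blocks_iff_chars text j Ln k hLn1 hk1 (by have hLk : Ln * k = k * Ln := Nat.mul_comm _ _; omega)).1
      intro jb hjb t ht
      have h2 := hall (jb : Int) (by omega) (by rw [← hk]; exact_mod_cast hjb)
      have e1 : (j : Int) + (jb : Int) * L = ((j + jb * Ln : Nat) : Int) := by
        rw [← hLn]; push_cast; ring
      rw [e1] at h2
      have h3 := h2.2
      rw [show ((j + jb * Ln : Nat) : Int) + L = ((j + jb * Ln + Ln : Nat) : Int) from by
        rw [← hLn]; push_cast; ring] at h3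
      rw [PySem.List.slice_natCast] at h3
      rw [show j + jb * Ln + Ln - (j + jb * Ln) = Ln from by omega] at h3
      have hb1 : j + jb * Ln + Ln ≤ n := by
        have h5 : (jb + 1) * Ln ≤ k * Ln := Nat.mul_le_mul_right _ (by omega)
        have h6 : (jb + 1) * Ln = jb * Ln + Ln := by ring
        have hLk : Ln * k = k * Ln := Nat.mul_comm _ _
        omega
      exact (pv_slice_eq_iff text (j + jb * Ln) j Ln hb1 hjL).1 h3 t ht
    · intro hch jj h0 hjk
      have hjb : jj.toNat < k := by omega
      have hjj : ((jj.toNat : Nat) : Int) = jj := Int.toNat_of_nonneg h0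
      set jb := jj.toNat with hjbdef
      have hb1 : j + jb * Ln + Ln ≤ n := by
        have h5 : (jb + 1) * Ln ≤ k * Ln := Nat.mul_le_mul_right _ (by omega)
        have h6 : (jb + 1) * Ln = jb * Ln + Ln := by ring
        have hLk : Ln * k = k * Ln := Nat.mul_comm _ _
        omega
      have e1 : (j : Int) + jj * L = ((j + jb * Ln : Nat) : Int) := by
        rw [← hLn, ← hjj]; push_cast; ring
      have e2 : (j : Int) + jj * L + L = ((j + jb * Ln + Ln : Nat) : Int) := by
        rw [← hLn, ← hjj]; push_cast; ring
      constructor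
      · rw [e2]; exact_mod_cast Int.ofNat_le.mpr hb1
      · rw [e1, show ((j + jb * Ln : Nat) : Int) + L = ((j + jb * Ln + Ln : Nat) : Int) from by
            rw [← hLn]; push_cast; ring, PySem.List.slice_natCast,
          show j + jb * Ln + Ln - (j + jb * Ln) = Ln from by omega]
        apply (pv_slice_eq_iff text (j + jb * Ln) j Ln hb1 hjL).2
        intro t ht
        exact (pv_blocks_iff_chars text j Ln k hLn1 hk1 (by have hLk : Ln * k = k * Ln := Nat.mul_comm _ _; omega)).2 hch jb hjb t ht
  -- the run condition ↔ the shifted-character condition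
  have hrun : ((mr - 1) * L ≤ pvRun text Ln j) ↔
      ∀ p < (k - 1) * Ln, text.getD (j + p) ' ' = text.getD (j + p + Ln) ' ' := by
    have hcast2 : (mr - 1) * L = (((k - 1) * Ln : Nat) : Int) := by
      rw [Nat.cast_mul, Nat.cast_sub hk1, hk, hLn]; norm_num
    rw [hcast2, pv_run_ge_iff]
    constructor
    · intro h p hp; exact (h p hp).2
    · intro h p hp; exact ⟨hchars_bound p hp, h p hp⟩
  -- assemble
  simp only [pvQA, pvQ]
  rw [decide_eq_decide, hLn]
  constructor
  · rintro ⟨h1, h2⟩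
    refine ⟨hj, ?_, hrun.2 (hwhile.1 (by rw [← hpat]; exact h2))⟩
    apply hlns.2
    by_contra hno
    apply h1
    apply hstrip.2
    intro t ht
    rcases Bool.eq_false_or_eq_true (PySem.Chars.isspace (text.getD (j + t) ' ')) with hb | hb
    · exact hb
    · exact absurd ⟨t, ht, hb⟩ hno
  · rintro ⟨_, h1, h2⟩
    constructor
    · intro hzero
      rcases hlns.1 h1 with ⟨t, ht, htf⟩
      rw [hstrip.1 hzero t ht] at htf
      exact absurd htf (by simp)
    · rw [hpat]
      exact hwhile.2 (hrun.1 h2)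

-- the backward sweep computes the smallest qualifying index -----------------------

theorem pv_scan_eq (text : List Char) (L : Nat) (need limit : Int) :
    ∀ (i : Nat), i ≤ text.length → ∀ (best : Int),
      pvB_scan text L need limit i (pvRun text L i) (pvLns text i) best =
        (match (List.range i).find? (pvQ text L need limit) with
         | some j => (j : Int)
         | none => best) := by
  intro i
  induction i with
  | zero => intro _ best; simp [pvB_scan]
  | succ i ih =>
    intro hi best
    have hiL : i < text.length := by omega
    simp only [pvB_scan]
    have hr : (if i + L < text.length ∧ text.getD i ' ' = text.getD (i + L) ' '
        then pvRun text L (i + 1) + 1 else 0) = pvRun text L i := by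
      conv_rhs => rw [pvRun]
      split_ifs with h <;> rfl
    have hl : (if PySem.Chars.isspace (text.getD i ' ') = false then (i : Int) else pvLns text (i + 1))
        = pvLns text i := by
      conv_rhs => rw [pvLns]
      rw [dif_pos hiL]
      by_cases hs : PySem.Chars.isspace (text.getD i ' ') = true
      · rw [hs]; simp
      · rw [Bool.not_eq_true] at hs; rw [hs]; simp
    rw [hr, hl]
    have hb : (if (i : Int) < limit ∧ pvLns text i < (i : Int) + L ∧ pvRun text L i ≥ need
        then (i : Int) else best) = (if pvQ text L need limit i then (i : Int) else best) := by
      simp [pvQ, ge_iff_le]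
    rw [hb, ih (by omega)]
    rw [List.range_succ, List.find?_append]
    cases hf : (List.range i).find? (pvQ text L need limit) with
    | some j => simp
    | none =>
      simp only [Option.none_or]
      rw [List.find?_singleton]
      by_cases hq : pvQ text L need limit i <;> simp [hq]

-- A's start loop returns the token index of the first qualifying start -------------

theorem pv_startLoop_find (text : List Char) (tokens : List String) (mr L : Int) :
    ∀ (l : List Int),
      (∀ s ∈ l, pvQA text mr L s = true → (pvA_tok tokens s 0 0).isSome) →
      pvA_startLoop text tokens mr L l =
        (match l.find? (pvQA text mr L) with
         | some s => pvA_tok tokens s 0 0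
         | none => none) := by
  intro l
  induction l with
  | nil => intro _; rfl
  | cons s rest ih =>
    intro hyp
    have ihv := ih (fun x hx hq => hyp x (List.mem_cons_of_mem _ hx) hq)
    simp only [pvA_startLoop]
    by_cases h1 : (PySem.Chars.strip (PySem.List.slice text (some s) (some (s + L)))).length = 0
    · have hq : pvQA text mr L s = false := by simp [pvQA, h1]
      rw [if_pos h1, List.find?_cons_of_neg (by simp [hq]), ihv]
    · rw [if_neg h1]
      by_cases h2 : pvA_while text (PySem.List.slice text (some s) (some (s + L))) L
          (text.length + 1) s 0 ≥ mr
      · have hq : pvQA text mr L s = true := by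
          simp only [pvQA, decide_eq_true_eq]; exact ⟨h1, h2⟩
        rw [if_pos h2, List.find?_cons_of_pos hq]
        obtain ⟨i, hi⟩ := Option.isSome_iff_exists.1 (hyp s List.mem_cons_self hq)
        simp [hi]
      · have hq : pvQA text mr L s = false := by
          simp only [pvQA, decide_eq_false_iff_not]
          intro hcon; exact h2 hcon.2
        rw [if_neg h2, List.find?_cons_of_neg (by simp [hq]), ihv]

theorem pv_find_congr_mem {α : Type} (l : List α) (p q : α → Bool)
    (h : ∀ a ∈ l, p a = q a) : l.find? p = l.find? q := by
  induction l with
  | nil => rfl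
  | cons a l ih =>
    have ha := h a List.mem_cons_self
    cases hq : q a with
    | true => rw [List.find?_cons_of_pos (ha.trans hq), List.find?_cons_of_pos hq]
    | false =>
      rw [List.find?_cons_of_neg (by simp [ha, hq]), List.find?_cons_of_neg (by simp [hq])]
      exact ih (fun x hx => h x (List.mem_cons_of_mem _ hx))

theorem pv_find_range_shrink (p : Nat → Bool) (m n : Nat) (hmn : m ≤ n)
    (h : ∀ j, p j = true → j < m) :
    (List.range n).find? p = (List.range m).find? p := by
  have : List.range n = List.range m ++ (List.range (n - m)).map (m + ·) := by
    rw [← List.range_add]; congr 1; omega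
  rw [this, List.find?_append]
  have h2 : ((List.range (n - m)).map (m + ·)).find? p = none := by
    rw [List.find?_eq_none]
    intro x hx
    simp at hx
    obtain ⟨a, ha, rfl⟩ := hx
    intro hc
    have := h _ hc
    omega
  rw [h2, Option.or_none]

-- per-length equivalence and the outer loops ---------------------------------------

theorem pv_lenLoop_eq (text : List Char) (tokens : List String) (mr : Int) (hmr : 1 ≤ mr)
    (hsum : ((text.length : Int)) = (tokens.map PySem.Str.len).sum) :
    ∀ (l : List Int), (∀ L ∈ l, 1 ≤ L) →
      pvA_lenLoop text tokens mr l = pvB_lenLoop text (pvB_cum tokens 0) mr l := by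
  intro l
  induction l with
  | nil => intro _; rfl
  | cons L rest ih =>
    intro hall
    have hL1 : 1 ≤ L := hall L List.mem_cons_self
    have ihv := ih (fun x hx => hall x (List.mem_cons_of_mem _ hx))
    have hpos : 0 < L * mr := mul_pos (by omega) (by omega)
    simp only [pvA_lenLoop, pvB_lenLoop]
    set n := text.length
    set limit : Int := (n : Int) - L * mr with hlimit
    set need : Int := (mr - 1) * L with hneed
    have hscan : pvB_scan text L.toNat need limit n 0 (n : Int) (-1) =
        (match (List.range n).find? (pvQ text L.toNat need limit) with
         | some j => (j : Int)
         | none => -1) := by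
      conv_lhs => rw [← pv_run_len text L.toNat, ← pv_lns_len text]
      exact pv_scan_eq text L.toNat need limit n le_rfl (-1)
    have htok : ∀ s ∈ PySem.List.pyRange 0 limit 1, pvQA text mr L s = true →
        (pvA_tok tokens s 0 0).isSome := by
      intro s hs _
      have hmem := PySem.List.mem_pyRange_one.1 hs
      apply pv_tok_total tokens s 0 0 hmem.1
      rw [← hsum]
      omega
    have hstart := pv_startLoop_find text tokens mr L (PySem.List.pyRange 0 limit 1) htok
    have hshrink := pv_find_range_shrink (pvQ text L.toNat need limit) limit.toNat n
      (by omega)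
      (by
        intro jq hq
        simp only [pvQ, decide_eq_true_eq] at hq
        omega)
    rw [hstart, PySem.List.pyRange_one, List.find?_map]
    have hcong : (List.range (limit - 0).toNat).find? ((pvQA text mr L) ∘ (fun k : Nat => (0 : Int) + (k : Nat))) =
        (List.range limit.toNat).find? (pvQ text L.toNat need limit) := by
      rw [sub_zero]
      apply pv_find_congr_mem
      intro a ha
      rw [List.mem_range] at ha
      show pvQA text mr L ((0 : Int) + (a : Int)) = _
      rw [show (0 : Int) + (a : Int) = (a : Int) from by ring]
      exact pv_point text mr L hL1 hmr a (by omega)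
    rw [hcong, hscan, hshrink]
    cases hf : (List.range limit.toNat).find? (pvQ text L.toNat need limit) with
    | none => simpa using ihv
    | some jn =>
      have hmemr : jn ∈ List.range limit.toNat := List.mem_of_find?_eq_some hf
      rw [List.mem_range] at hmemr
      have htoks : (pvA_tok tokens ((jn : Int)) 0 0).isSome := by
        apply pv_tok_total tokens _ 0 0 (by omega)
        rw [← hsum]
        omega
      obtain ⟨i, hi⟩ := Option.isSome_iff_exists.1 htoks
      have hfindv : pvB_find (pvB_cum tokens 0) ((jn : Int)) 0 = some i := by
        rw [← pv_tok_eq_find tokens ((jn : Int)) 0 0]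
        exact hi
      simp only [Option.map_some, zero_add]
      rw [hi, if_pos (by omega : ((jn : Int)) ≥ 0), hfindv]

theorem pv_floordiv_nonpos (n mr : Int) (hn : 0 ≤ n) (hmr : mr < 0) :
    PySem.Int.floordiv n mr ≤ 0 := by
  have hmod := PySem.Int.mod_neg_bounds n hmr
  have heq := PySem.Int.floordiv_mul_add_mod n mr
  nlinarith [hmod.1, hmod.2]

-- ===== VERDICT (by name: the statement is the Claim_ definition above) =====
theorem detect_loop_onset_spec : Claim_equal_detect_loop_onset := by
  intro tokens mr _hdom hpre
  unfold Spec_detect_loop_onset detect_loop_onset detect_loop_onset_alt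
  dsimp only
  rcases lt_trichotomy mr 0 with hneg | hzero | hposi
  · have hfd := pv_floordiv_nonpos ((PySem.Chars.join [] (tokens.map String.toList)).length : Int) mr
      (by positivity) hneg
    rw [PySem.List.pyRange_one_eq_nil (by omega : min 30 (PySem.Int.floordiv ((PySem.Chars.join [] (tokens.map String.toList)).length : Int) mr) ≤ 1)]
    rfl
  · exact absurd hzero hpre
  · apply pv_lenLoop_eq
    · omega
    · rw [pv_join_nil_flatten]
      exact pv_sum_len tokens
    · intro L hL
      exact (PySem.List.mem_pyRange_one.1 hL).1
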